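-- pv_equiv track=rewrite | github.com/zofialuther/CS8395-08-Paper1-updated | data/translated-code/direct-translations/prolog/Rep-string.py | repstring
-- ===== SOURCE A (Python) =====
-- def repstring(Codes):
--     Reps = set()
--     for RepLength in range(1, len(Codes)//2 + 1):
--         for i in range(len(Codes) - RepLength):
--             R = Codes[i:i+RepLength]
--             if Codes.startswith(R, i+RepLength):
--                 Reps.add(R)
--     return Reps
-- ===== SOURCE B (Python) =====
-- def repstring(Codes):
--     # Per length L: if the whole overlap is periodic (Codes[L:] == Codes[:n-L]) every
--     # position starts a double block; otherwise one right-to-left run scan decides each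
--     # position in O(1) (run >= L) instead of A's O(L) block comparison: O(n^2) total.
--     n = len(Codes)
--     reps = set()
--     for L in range(1, n // 2 + 1):
--         if Codes[L:] == Codes[:n - L]:
--             starts = range(n - 2 * L + 1)
--         else:
--             run = 0
--             starts = []
--             for i in range(n - L - 1, -1, -1):
--                 run = run + 1 if Codes[i] == Codes[i + L] else 0
--                 if run >= L:
--                     starts.append(i)
--             starts.reverse()
--         for i in starts:
--             reps.add(Codes[i:i + L])
--     return reps
-- ===== Notes on version B (the rewrite author's own statement) =====
-- stated objective: faster
-- what changed: Instead of re-comparing the two adjacent blocks character by character for every (length, position), B handles each length L with a whole-overlap equality fast path (periodic overlap: every position qualifies) and otherwise one right-to-left run scan counting consecutive positions with Codes[i] == Codes[i+L], deciding each position in O(1).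
import Mathlib
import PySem

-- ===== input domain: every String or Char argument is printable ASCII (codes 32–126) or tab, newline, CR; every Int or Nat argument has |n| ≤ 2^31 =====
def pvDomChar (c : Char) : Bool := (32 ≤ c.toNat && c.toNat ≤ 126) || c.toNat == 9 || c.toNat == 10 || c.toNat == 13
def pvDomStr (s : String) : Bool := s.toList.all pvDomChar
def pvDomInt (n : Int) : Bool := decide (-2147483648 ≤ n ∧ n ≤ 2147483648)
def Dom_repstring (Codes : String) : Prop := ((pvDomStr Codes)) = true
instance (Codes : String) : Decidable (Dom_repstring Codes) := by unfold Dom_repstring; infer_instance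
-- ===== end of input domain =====

-- B replaces A's per-position O(L) block comparison by, per length L, either a whole-
-- overlap equality fast path (periodic overlap: every position qualifies) or one
-- right-to-left run scan deciding each position in O(1); equivalence is proved exactly.
-- Both return a Python set; insertion order (length asc, then position asc) coincides.

-- ===== PORT A =====
-- range(1, n//2+1) = List.range' 1 (n/2); range(n-L) = List.range (n-L) (Nat sub clamps
-- to empty exactly like Python's range of a non-positive bound); Codes[i:i+L] with
-- nonneg in-range bounds = (cs.drop i).take L; Codes.startswith(R, k) with k ≥ 0 =
-- startswith of the suffix from k (Python clamps the start the same way drop does).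
def repstring (Codes : String) : List String :=
  let cs := Codes.toList
  List.foldl (fun Reps RepLength =>
    List.foldl (fun Reps i =>
      let R := (cs.drop i).take RepLength
      if PySem.Chars.startswith (cs.drop (i + RepLength)) R then
        PySem.Set.add Reps (String.ofList R)
      else Reps)
      Reps (List.range (cs.length - RepLength)))
    [] (List.range' 1 (cs.length / 2))

-- ===== PORT B =====
-- The descending inner loop of Source B (i from n-L-1 down to 0, carrying `run` and
-- collecting qualifying starts); Source B appends then reverses, the port conses, which
-- builds the identical ascending list.  Codes[L:] / Codes[:n-L] are drop/take, and
-- range(n-2L+1) = List.range (n-2L+1) (n-2L ≥ 0 whenever 1 ≤ L ≤ n//2).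
def scanB (cs : List Char) (L : Nat) : Nat → Nat → List Nat → List Nat
  | 0, _, starts => starts
  | i+1, run, starts =>
    let run' := if cs[i]? = cs[i + L]? then run + 1 else 0
    scanB cs L i run' (if L ≤ run' then i :: starts else starts)

def repstring_alt (Codes : String) : List String :=
  let cs := Codes.toList
  List.foldl (fun reps L =>
    let starts := if cs.drop L = cs.take (cs.length - L)
                  then List.range (cs.length - 2*L + 1)
                  else scanB cs L (cs.length - L) 0 []
    List.foldl (fun reps i => PySem.Set.add reps (String.ofList ((cs.drop i).take L)))
      reps starts)
    [] (List.range' 1 (cs.length / 2))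

-- ===== PRECONDITION & SPEC =====
def Spec_repstring (Codes : String) (out : List String) : Prop := out = repstring_alt Codes
instance (Codes : String) (out : List String) : Decidable (Spec_repstring Codes out) := by unfold Spec_repstring; infer_instance

-- ===== CLAIM (what is proved, stated in full; the proofs are below) =====
def Claim_equal_repstring : Prop := ∀ (Codes : String), Dom_repstring Codes → Spec_repstring Codes (repstring Codes)

-- ===== LEMMAS AND PROOFS =====

-- run length of consecutive matches cs[j] = cs[j+L] starting at i, positions below m
def runV (cs : List Char) (L m i : Nat) : Nat :=
  if _h : i < m then (if cs[i]? = cs[i + L]? then runV cs L m (i+1) + 1 else 0) else 0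
termination_by m - i

theorem runV_ge (cs : List Char) (L m : Nat) :
    ∀ (k i : Nat), i ≤ m →
      (k ≤ runV cs L m i ↔ i + k ≤ m ∧ ∀ j < k, cs[i + j]? = cs[i + j + L]?) := by
  intro k
  induction k with
  | zero => intro i hi; simp [hi]
  | succ k ih =>
    intro i hi
    rw [runV]
    by_cases h : i < m
    · rw [dif_pos h]
      by_cases he : cs[i]? = cs[i + L]?
      · rw [if_pos he]
        rw [Nat.add_le_add_iff_right, ih (i+1) h]
        constructor
        · rintro ⟨h1, h2⟩
          refine ⟨by omega, ?_⟩
          intro j hj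
          rcases Nat.eq_zero_or_pos j with rfl | hj0
          · simpa using he
          · have := h2 (j - 1) (by omega)
            have e1 : i + 1 + (j - 1) = i + j := by omega
            rw [e1] at this; exact this
        · rintro ⟨h1, h2⟩
          refine ⟨by omega, ?_⟩
          intro j hj
          have := h2 (j + 1) (by omega)
          have e1 : i + (j + 1) = i + 1 + j := by omega
          rw [e1] at this; exact this
      · rw [if_neg he]
        constructor
        · omega
        · rintro ⟨_, h2⟩
          exact absurd (by simpa using h2 0 (Nat.succ_pos k)) he
    · rw [dif_neg h]
      constructor
      · omega
      · rintro ⟨h1, _⟩; omega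

theorem scanB_eq (cs : List Char) (L m : Nat) :
    ∀ (k : Nat) (s : List Nat), k ≤ m →
      scanB cs L k (runV cs L m k) s =
        ((List.range k).filter (fun j => decide (L ≤ runV cs L m j))) ++ s := by
  intro k
  induction k with
  | zero => intro s _; simp [scanB]
  | succ i ih =>
    intro s hk
    have hi : i < m := hk
    rw [scanB]
    have hrun : (if cs[i]? = cs[i + L]? then runV cs L m (i+1) + 1 else 0) = runV cs L m i := by
      conv_rhs => rw [runV]
      rw [dif_pos hi]
    rw [hrun]
    rw [ih _ (by omega)]
    rw [List.range_succ, List.filter_append, List.append_assoc]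
    congr 1
    by_cases hq : L ≤ runV cs L m i <;> simp [hq]

theorem foldl_if_filter {α β : Type} (g : β → α → β) (p : α → Bool) :
    ∀ (l : List α) (b : β),
      List.foldl (fun b a => if p a then g b a else b) b l = List.foldl g b (l.filter p) := by
  intro l
  induction l with
  | nil => intro b; rfl
  | cons a l ih =>
    intro b
    by_cases h : p a <;> simp [List.foldl_cons, h, ih]

-- A's startswith test at position i (i < n - L, 1 ≤ L) ↔ B's run test
theorem cond_equiv (cs : List Char) (L i : Nat) (hL : 1 ≤ L) (hi : i < cs.length - L) :
    PySem.Chars.startswith (cs.drop (i + L)) ((cs.drop i).take L) = true ↔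
      L ≤ runV cs L (cs.length - L) i := by
  rw [PySem.Chars.startswith_iff]
  rw [runV_ge cs L (cs.length - L) L i (by omega)]
  have hlen : ((cs.drop i).take L).length = L := by
    simp; omega
  constructor
  · intro hpre
    have heq : (cs.drop (i + L)).take L = (cs.drop i).take L := by
      have := List.prefix_iff_eq_take.mp hpre
      rw [hlen] at this
      exact this.symm
    have hpt : ∀ j < L, cs[i + j]? = cs[i + j + L]? := by
      intro j hj
      have := congrArg (fun l => l[j]?) heq
      simp only [List.getElem?_take, List.getElem?_drop, hj, if_true] at this
      have e1 : i + L + j = i + j + L := by omega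
      rw [e1] at this
      exact this.symm
    refine ⟨?_, hpt⟩
    have := hpt (L - 1) (by omega)
    have e2 : i + (L - 1) + L = i + 2*L - 1 := by omega
    have hsome : cs[i + (L-1)]?.isSome := by
      rw [isSome_getElem?]; omega
    rw [this] at hsome
    rw [isSome_getElem?] at hsome
    omega
  · rintro ⟨h1, h2⟩
    rw [List.prefix_iff_eq_take, hlen]
    apply List.ext_getElem?
    intro j
    by_cases hj : j < L
    · simp only [List.getElem?_take, List.getElem?_drop, hj, if_true]
      have := h2 j hj
      have e1 : i + L + j = i + j + L := by omega
      rw [e1]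
      exact this
    · simp [hj]

-- full-match overlap: every position below m matches its mate L further on
theorem full_match (cs : List Char) (L : Nat)
    (h : cs.drop L = cs.take (cs.length - L)) :
    ∀ i < cs.length - L, cs[i]? = cs[i + L]? := by
  intro i hi
  have := congrArg (fun l => l[i]?) h
  simp only [List.getElem?_drop, List.getElem?_take, hi, if_true] at this
  rw [Nat.add_comm L i] at this
  exact this.symm

theorem runV_full (cs : List Char) (L m : Nat)
    (h : ∀ i < m, cs[i]? = cs[i + L]?) :
    ∀ i ≤ m, runV cs L m i = m - i := by
  intro i hi
  have h1 : m - i ≤ runV cs L m i := by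
    rw [runV_ge cs L m (m - i) i hi]
    refine ⟨by omega, ?_⟩
    intro j hj
    exact h (i + j) (by omega)
  have h2 : runV cs L m i ≤ m - i := by
    have := (runV_ge cs L m (runV cs L m i) i hi).mp (le_refl _)
    omega
  omega

theorem filter_lt_range (k : Nat) :
    ∀ m, k ≤ m → (List.range m).filter (fun i => decide (i < k)) = List.range k := by
  intro m
  induction m with
  | zero => intro h; have : k = 0 := by omega
            subst this; rfl
  | succ m ih =>
    intro h
    rcases Nat.lt_or_ge k (m+1) with hk | hk
    · rw [List.range_succ, List.filter_append, ih (by omega)]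
      have : ¬ m < k := by omega
      simp [this]
    · have hk' : k = m + 1 := by omega
      subst hk'
      apply List.filter_eq_self.mpr
      intro a ha
      rw [List.mem_range] at ha
      simpa using ha

theorem inner_eq (cs : List Char) (L : Nat) (hL : 1 ≤ L) (hL2 : 2*L ≤ cs.length)
    (reps : List String) :
    List.foldl (fun Reps i =>
      let R := (cs.drop i).take L
      if PySem.Chars.startswith (cs.drop (i + L)) R then
        PySem.Set.add Reps (String.ofList R)
      else Reps)
      reps (List.range (cs.length - L)) =
    List.foldl (fun reps i => PySem.Set.add reps (String.ofList ((cs.drop i).take L)))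
      reps (if cs.drop L = cs.take (cs.length - L)
            then List.range (cs.length - 2*L + 1)
            else scanB cs L (cs.length - L) 0 []) := by
  have hfilter : List.foldl (fun Reps i =>
      let R := (cs.drop i).take L
      if PySem.Chars.startswith (cs.drop (i + L)) R then
        PySem.Set.add Reps (String.ofList R)
      else Reps)
      reps (List.range (cs.length - L)) =
    List.foldl (fun reps i => PySem.Set.add reps (String.ofList ((cs.drop i).take L)))
      reps ((List.range (cs.length - L)).filter
        (fun j => decide (L ≤ runV cs L (cs.length - L) j))) := by
    rw [foldl_if_filter (fun Reps i => PySem.Set.add Reps (String.ofList ((cs.drop i).take L)))]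
    congr 1
    apply List.filter_congr
    intro i hi
    rw [List.mem_range] at hi
    rw [Bool.eq_iff_iff, decide_eq_true_iff]
    exact cond_equiv cs L i hL hi
  rw [hfilter]
  by_cases hfull : cs.drop L = cs.take (cs.length - L)
  · rw [if_pos hfull]
    congr 1
    have hm := full_match cs L hfull
    have heqp : ∀ i ∈ List.range (cs.length - L),
        (decide (L ≤ runV cs L (cs.length - L) i)) = decide (i < cs.length - 2*L + 1) := by
      intro i hi
      rw [List.mem_range] at hi
      rw [runV_full cs L (cs.length - L) hm i (by omega)]
      by_cases hq : i < cs.length - 2*L + 1 <;> simp [hq] <;> omega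
    rw [List.filter_congr heqp]
    exact filter_lt_range (cs.length - 2*L + 1) (cs.length - L) (by omega)
  · rw [if_neg hfull]
    have h0 : (0 : Nat) = runV cs L (cs.length - L) (cs.length - L) := by
      rw [runV]; simp
    rw [h0, scanB_eq cs L (cs.length - L) (cs.length - L) [] (le_refl _), List.append_nil]

-- ===== VERDICT (by name: the statement is the Claim_ definition above) =====
theorem repstring_spec : Claim_equal_repstring := by
  intro Codes _
  unfold Spec_repstring repstring repstring_alt
  apply PySem.List.foldl_congr_mem
  intro reps L hL
  rw [List.mem_range'] at hL
  obtain ⟨j, _, rfl⟩ := hL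
  simp only [one_mul]
  exact inner_eq Codes.toList (1 + j) (by omega) (by omega) reps
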